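-- pv_equiv track=rewrite | github.com/novartis-nk/Django-Unsplash-clone | users/num_converter.py | NumConverter
-- ===== SOURCE A (Python) =====
-- def NumConverter(number):
-- 	num = str(number)
-- 	num = num[::-1]
-- 	list_num = []
-- 	spacing = []
-- 	for i in num:
-- 		list_num.append(i)
-- 	for i in range(1, len(list_num)):
-- 		if i % 3 == 0 :
-- 			spacing.append(i)
-- 	for i in range(len(spacing)):
-- 		list_num.insert(spacing[i]+i ,',')
-- 	list_num.reverse()
--
-- 	for i in range(len(list_num)):
-- 		if list_num[i] == '0':
-- 			list_num[i] = '۰'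
-- 		elif list_num[i] == '1':
-- 			list_num[i] = '۱'
-- 		elif list_num[i] == '2':
-- 			list_num[i] = '۲'
-- 		elif list_num[i] == '3':
-- 			list_num[i] = '۳'
-- 		elif list_num[i] == '4':
-- 			list_num[i] = '۴'
-- 		elif list_num[i] == '5':
-- 			list_num[i] = '۵'
-- 		elif list_num[i] == '6':
-- 			list_num[i] = '۶'
-- 		elif list_num[i] == '7':
-- 			list_num[i] = '۷'
-- 		elif list_num[i] == '8':
-- 			list_num[i] = '۸'
-- 		elif list_num[i] == '9':
-- 			list_num[i] = '۹'
-- 	final_res = ""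
-- 	for i in list_num:
-- 		final_res+=i
-- 	return final_res
-- ===== SOURCE B (Python) =====
-- def NumConverter(number):
--     s = str(number)[::-1]
--     res = ','.join(s[i:i+3] for i in range(0, len(s), 3))[::-1]
--     return res.translate(str.maketrans('0123456789', '۰۱۲۳۴۵۶۷۸۹'))
-- ===== Notes on version B (the rewrite author's own statement) =====
-- stated objective: simpler
-- what changed: Replaces A's append loop, modulo-filtered spacing list, positional insert loop and ten-branch if/elif digit chain with slicing the reversed string into chunks of 3, joining them with ',' and mapping digits to Persian via a translate table.
import Mathlib
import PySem

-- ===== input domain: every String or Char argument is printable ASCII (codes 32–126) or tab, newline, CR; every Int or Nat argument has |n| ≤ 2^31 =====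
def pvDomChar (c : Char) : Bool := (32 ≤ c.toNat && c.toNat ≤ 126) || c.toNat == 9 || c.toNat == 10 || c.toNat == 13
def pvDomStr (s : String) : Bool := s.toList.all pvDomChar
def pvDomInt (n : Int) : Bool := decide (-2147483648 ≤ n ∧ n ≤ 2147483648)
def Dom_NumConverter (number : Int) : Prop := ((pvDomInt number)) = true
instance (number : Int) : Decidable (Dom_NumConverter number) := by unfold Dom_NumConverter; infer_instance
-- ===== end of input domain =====

-- B replaces A's three positional index loops and the ten-branch digit if/elif chain by
-- chunk-of-3 slicing on the reversed string joined with ',' plus a translate table (objective: simpler).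

-- ===== PORT A =====
def NumConverter (number : Int) : String :=
  -- num = str(number); num = num[::-1]
  let num : List Char := (PySem.Int.toStr number).toList
  let num : List Char := (PySem.List.slice? num none none (-1)).getD []
  -- for i in num: list_num.append(i)
  let list_num : List Char := num.foldl (fun acc i => acc ++ [i]) []
  -- for i in range(1, len(list_num)): if i % 3 == 0: spacing.append(i)
  let spacing : List Int :=
    (PySem.List.pyRange 1 (PySem.List.len list_num) 1).foldl
      (fun acc i => if i % 3 == 0 then acc ++ [i] else acc) []
  -- for i in range(len(spacing)): list_num.insert(spacing[i]+i, ',')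
  let list_num : List Char :=
    (PySem.List.pyRange 0 (PySem.List.len spacing) 1).foldl
      (fun ln i => PySem.List.insert ln (PySem.List.pyGetD spacing i 0 + i) ',') list_num
  -- list_num.reverse()
  let list_num : List Char := list_num.reverse
  -- for i in range(len(list_num)): if list_num[i] == '0': list_num[i] = '۰' elif …
  let list_num : List Char :=
    (PySem.List.pyRange 0 (PySem.List.len list_num) 1).foldl
      (fun ln i =>
        if PySem.List.pyGetD ln i ' ' == '0' then PySem.List.pySetD ln i '۰'
        else if PySem.List.pyGetD ln i ' ' == '1' then PySem.List.pySetD ln i '۱'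
        else if PySem.List.pyGetD ln i ' ' == '2' then PySem.List.pySetD ln i '۲'
        else if PySem.List.pyGetD ln i ' ' == '3' then PySem.List.pySetD ln i '۳'
        else if PySem.List.pyGetD ln i ' ' == '4' then PySem.List.pySetD ln i '۴'
        else if PySem.List.pyGetD ln i ' ' == '5' then PySem.List.pySetD ln i '۵'
        else if PySem.List.pyGetD ln i ' ' == '6' then PySem.List.pySetD ln i '۶'
        else if PySem.List.pyGetD ln i ' ' == '7' then PySem.List.pySetD ln i '۷'
        else if PySem.List.pyGetD ln i ' ' == '8' then PySem.List.pySetD ln i '۸'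
        else if PySem.List.pyGetD ln i ' ' == '9' then PySem.List.pySetD ln i '۹'
        else ln) list_num
  -- final_res = ""; for i in list_num: final_res += i
  String.ofList (list_num.foldl (fun acc i => acc ++ [i]) [])

-- ===== PORT B =====
-- str.maketrans('0123456789', '۰۱۲۳۴۵۶۷۸۹') as an association table
def pvPersianTable : List (Char × Char) :=
  List.zip "0123456789".toList "۰۱۲۳۴۵۶۷۸۹".toList

def NumConverter_alt (number : Int) : String :=
  -- s = str(number)[::-1]
  let s : List Char := (PySem.List.slice? (PySem.Int.toStr number).toList none none (-1)).getD []
  -- ','.join(s[i:i+3] for i in range(0, len(s), 3))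
  let res : List Char :=
    PySem.Chars.join [','] ((PySem.List.pyRange 0 (PySem.List.len s) 3).map
      (fun i => PySem.List.slice s (some i) (some (i + 3))))
  -- [::-1]
  let res : List Char := (PySem.List.slice? res none none (-1)).getD []
  -- res.translate(table): mapped chars replaced, others kept
  String.ofList (res.map (fun c => ((pvPersianTable.lookup c).getD c)))

-- ===== PRECONDITION & SPEC =====
def Spec_NumConverter (number : Int) (out : String) : Prop := out = NumConverter_alt number
instance (number : Int) (out : String) : Decidable (Spec_NumConverter number out) := by unfold Spec_NumConverter; infer_instance

-- ===== CLAIM (what is proved, stated in full; the proofs are below) =====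
def Claim_equal_NumConverter : Prop := ∀ (number : Int), Dom_NumConverter number → Spec_NumConverter number (NumConverter number)


-- ===== LEMMAS AND PROOFS =====

-- the translate function of B, as a named helper
def pvTr (c : Char) : Char := (pvPersianTable.lookup c).getD c

-- the common intermediate value: reversed digit string grouped in 3s with ','
def pvRef (l : List Char) : List Char :=
  if h : l.length ≤ 3 then l else l.take 3 ++ ',' :: pvRef (l.drop 3)
termination_by l.length
decreasing_by simp; omega

-- A's if/elif chain body of the last loop, named
def pvStepA (ln : List Char) (i : Int) : List Char :=
  if PySem.List.pyGetD ln i ' ' == '0' then PySem.List.pySetD ln i '۰'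
  else if PySem.List.pyGetD ln i ' ' == '1' then PySem.List.pySetD ln i '۱'
  else if PySem.List.pyGetD ln i ' ' == '2' then PySem.List.pySetD ln i '۲'
  else if PySem.List.pyGetD ln i ' ' == '3' then PySem.List.pySetD ln i '۳'
  else if PySem.List.pyGetD ln i ' ' == '4' then PySem.List.pySetD ln i '۴'
  else if PySem.List.pyGetD ln i ' ' == '5' then PySem.List.pySetD ln i '۵'
  else if PySem.List.pyGetD ln i ' ' == '6' then PySem.List.pySetD ln i '۶'
  else if PySem.List.pyGetD ln i ' ' == '7' then PySem.List.pySetD ln i '۷'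
  else if PySem.List.pyGetD ln i ' ' == '8' then PySem.List.pySetD ln i '۸'
  else if PySem.List.pyGetD ln i ' ' == '9' then PySem.List.pySetD ln i '۹'
  else ln

theorem pv_foldl_snoc {a : Type} (l acc : List a) :
    l.foldl (fun acc i => acc ++ [i]) acc = acc ++ l := by
  induction l generalizing acc with
  | nil => simp
  | cons x xs ih => simp [ih]

-- multiples of 3 in [1, n)
theorem pv_filter_range3 (n : Nat) :
    (PySem.List.pyRange 1 (n : Int) 1).filter (fun i => i % 3 == 0) =
      (List.range ((n - 1) / 3)).map (fun j => ((3 * j + 3 : Nat) : Int)) := by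
  induction n with
  | zero =>
    rw [show ((0 : Nat) : Int) = 0 from rfl, PySem.List.pyRange_one_eq_nil (by norm_num)]
    simp
  | succ m ih =>
    rcases Nat.eq_zero_or_pos m with hm | hm
    · subst hm
      rw [show ((1 : Nat) : Int) = 1 from rfl, PySem.List.pyRange_one_eq_nil (by norm_num)]
      simp
    · have hcast : ((m + 1 : Nat) : Int) = (m : Int) + 1 := by push_cast; ring
      rw [hcast, PySem.List.pyRange_one_succ_right (by exact_mod_cast hm),
          List.filter_append, ih]
      have hmod : ((m : Int) % 3 == 0) = decide (m % 3 = 0) := by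
        have h1 : (m : Int) % 3 = ((m % 3 : Nat) : Int) := by
          rw [Int.natCast_mod]; norm_num
        rw [h1]
        by_cases h : m % 3 = 0
        · simp [h]
        · simp only [h, decide_false]
          rw [show (((m % 3 : Nat) : Int) == 0) = false from by
            simp only [beq_eq_false_iff_ne, ne_eq, Nat.cast_eq_zero]
            omega]
      by_cases h3 : m % 3 = 0
      · have hk : (m + 1 - 1) / 3 = (m - 1) / 3 + 1 := by omega
        rw [hk, List.range_succ, List.map_append]
        simp only [List.filter_cons, List.filter_nil, hmod, h3, decide_true, if_true,
          List.map_cons, List.map_nil]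
        congr 2
        have : 3 * ((m - 1) / 3) + 3 = m := by omega
        rw [this]
      · have hk : (m + 1 - 1) / 3 = (m - 1) / 3 := by omega
        rw [hk]
        simp [List.filter_cons, hmod, h3]

-- spacing = [3, 6, ..., 3*((n-1)/3)]
theorem pv_spacing (n : Nat) :
    (PySem.List.pyRange 1 (n : Int) 1).foldl
      (fun acc i => if i % 3 == 0 then acc ++ [i] else acc) [] =
    (List.range ((n - 1) / 3)).map (fun j => ((3 * j + 3 : Nat) : Int)) := by
  have h := PySem.List.foldl_append_if (fun i : Int => i % 3 == 0) (fun i => i)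
      (PySem.List.pyRange 1 (n : Int) 1) []
  rw [h, List.nil_append, List.map_id', pv_filter_range3]

-- inserting past a fixed prefix
theorem pv_insert_append (p t : List Char) (q : Nat) (v : Char) (h : q <= t.length) :
    PySem.List.insert (p ++ t) ((p.length + q : Nat) : Int) v =
      p ++ PySem.List.insert t ((q : Nat) : Int) v := by
  rw [PySem.List.insert_natCast _ _ _ (by simp; omega),
      PySem.List.insert_natCast _ _ _ h]
  rw [List.take_append, List.drop_append]
  simp [List.take_of_length_le, List.drop_of_length_le]

theorem pv_foldl_insert_length (k : Nat) (rest : List Char) (f : Nat → Int) :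
    ((List.range k).foldl (fun t j => PySem.List.insert t (f j) ',') rest).length
      = rest.length + k := by
  induction k with
  | zero => simp
  | succ m ih =>
    rw [List.range_succ, List.foldl_append]
    simp [PySem.List.length_insert, ih]
    omega

theorem pv_shift_fold (k : Nat) (p rest : List Char) (hp : p.length = 4)
    (hk : 3 * k <= rest.length) :
    (List.range k).foldl (fun t j => PySem.List.insert t ((4 * j + 7 : Nat) : Int) ',') (p ++ rest)
    = p ++ (List.range k).foldl (fun t j => PySem.List.insert t ((4 * j + 3 : Nat) : Int) ',') rest := by
  induction k with
  | zero => simp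
  | succ m ih =>
    rw [List.range_succ, List.foldl_append, List.foldl_append, ih (by omega)]
    simp only [List.foldl_cons, List.foldl_nil]
    have hlen := pv_foldl_insert_length m rest (fun j => ((4 * j + 3 : Nat) : Int))
    have h43 : (4 * m + 3 : Nat) <=
        ((List.range m).foldl (fun t j => PySem.List.insert t ((4 * j + 3 : Nat) : Int) ',') rest).length := by
      rw [hlen]; omega
    have hs := pv_insert_append p _ (4 * m + 3) ',' h43
    rw [hp] at hs
    have : ((4 + (4 * m + 3) : Nat) : Int) = ((4 * m + 7 : Nat) : Int) := by
      congr 1; omega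
    rw [this] at hs
    exact hs

theorem pv_comma_eq_ref (n : Nat) : ∀ l : List Char, l.length = n →
    (List.range ((l.length - 1) / 3)).foldl
      (fun t j => PySem.List.insert t ((4 * j + 3 : Nat) : Int) ',') l = pvRef l := by
  induction n using Nat.strong_induction_on with
  | _ n ih =>
    intro l hl
    by_cases h3 : l.length <= 3
    · have hk : (l.length - 1) / 3 = 0 := by omega
      rw [hk]
      simp [pvRef, h3]
    · push_neg at h3
      have hk : (l.length - 1) / 3 = (l.length - 4) / 3 + 1 := by omega
      rw [hk, List.range_succ_eq_map, List.foldl_cons, List.foldl_map]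
      have h0 : PySem.List.insert l ((4 * 0 + 3 : Nat) : Int) ',' =
          l.take 3 ++ ',' :: l.drop 3 := by
        have := PySem.List.insert_natCast l 3 ',' (by omega)
        simpa using this
      rw [h0]
      have hfun : (fun (t : List Char) (j : Nat) =>
            PySem.List.insert t ((4 * j.succ + 3 : Nat) : Int) ',')
          = (fun t j => PySem.List.insert t ((4 * j + 7 : Nat) : Int) ',') := by
        funext t j
        have h47 : 4 * j.succ + 3 = 4 * j + 7 := by omega
        rw [h47]
      rw [hfun]
      have hassoc : l.take 3 ++ ',' :: l.drop 3 = (l.take 3 ++ [',']) ++ l.drop 3 := by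
        simp
      have hsf := pv_shift_fold ((l.length - 4) / 3) (l.take 3 ++ [',']) (l.drop 3)
        (by simp only [List.length_append, List.length_take, List.length_cons,
              List.length_nil]; omega)
        (by simp only [List.length_drop]; omega)
      rw [hassoc, hsf]
      have harg : (l.length - 4) / 3 = ((l.drop 3).length - 1) / 3 := by
        simp only [List.length_drop]
        omega
      rw [harg, ih (l.drop 3).length (by simp; omega) (l.drop 3) rfl]
      conv_rhs => rw [pvRef]
      rw [dif_neg (by omega)]
      simp

theorem pv_intercalate_cons (x : List Char) (ys : List (List Char)) (h : ys ≠ []) :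
    List.intercalate [','] (x :: ys) = x ++ ',' :: List.intercalate [','] ys := by
  cases ys with
  | nil => exact absurd rfl h
  | cons y ys => simp [List.intercalate, List.intersperse]

theorem pv_inter_chunks (n : Nat) : ∀ l : List Char, l.length = n →
    List.intercalate [','] ((List.range ((l.length + 2) / 3)).map
      (fun k => (l.drop (3 * k)).take 3)) = pvRef l := by
  induction n using Nat.strong_induction_on with
  | _ n ih =>
    intro l hl
    by_cases h3 : l.length <= 3
    · rcases Nat.eq_zero_or_pos l.length with h0 | h0
      · have : l = [] := List.eq_nil_of_length_eq_zero h0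
        subst this
        simp [List.intercalate, pvRef]
      · have hm : (l.length + 2) / 3 = 1 := by omega
        rw [hm]
        simp [List.intercalate, List.take_of_length_le h3, pvRef, h3]
    · push_neg at h3
      have hm : (l.length + 2) / 3 = (l.length - 1) / 3 + 1 := by omega
      rw [hm, List.range_succ_eq_map, List.map_cons, List.map_map]
      have hfun : ((fun k => (l.drop (3 * k)).take 3) ∘ Nat.succ)
          = (fun k => ((l.drop 3).drop (3 * k)).take 3) := by
        funext k
        simp only [Function.comp_apply, List.drop_drop]
        congr 2
        omega
      rw [hfun]
      have hne : (List.range ((l.length - 1) / 3)).map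
          (fun k => ((l.drop 3).drop (3 * k)).take 3) ≠ [] := by
        simp
        omega
      rw [pv_intercalate_cons _ _ hne]
      have harg : (l.length - 1) / 3 = ((l.drop 3).length + 2) / 3 := by
        simp
        omega
      rw [harg, ih (l.drop 3).length (by simp; omega) (l.drop 3) rfl]
      simp only [Nat.mul_zero, List.drop_zero]
      conv_rhs => rw [pvRef]
      rw [dif_neg (by omega)]

theorem pv_stepA_eq (u : List Char) (m : Nat) (h : m < u.length) :
    pvStepA u (m : Int) = u.set m (pvTr (u.getD m ' ')) := by
  have hgd : u.getD m ' ' = u[m] := List.getD_eq_getElem u ' ' h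
  have htab : pvPersianTable = [('0','۰'),('1','۱'),('2','۲'),('3','۳'),('4','۴'),('5','۵'),('6','۶'),('7','۷'),('8','۸'),('9','۹')] := rfl
  unfold pvStepA pvTr
  rw [htab]
  simp only [PySem.List.pyGetD_natCast, PySem.List.pySetD_natCast]
  set c := u.getD m ' ' with hc
  by_cases h0 : c = '0'
  · rw [if_pos (by simp [h0]), h0]
    rfl
  rw [if_neg (by simp [h0])]
  by_cases h1 : c = '1'
  · rw [if_pos (by simp [h1]), h1]
    rfl
  rw [if_neg (by simp [h1])]
  by_cases h2 : c = '2'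
  · rw [if_pos (by simp [h2]), h2]
    rfl
  rw [if_neg (by simp [h2])]
  by_cases h3 : c = '3'
  · rw [if_pos (by simp [h3]), h3]
    rfl
  rw [if_neg (by simp [h3])]
  by_cases h4 : c = '4'
  · rw [if_pos (by simp [h4]), h4]
    rfl
  rw [if_neg (by simp [h4])]
  by_cases h5 : c = '5'
  · rw [if_pos (by simp [h5]), h5]
    rfl
  rw [if_neg (by simp [h5])]
  by_cases h6 : c = '6'
  · rw [if_pos (by simp [h6]), h6]
    rfl
  rw [if_neg (by simp [h6])]
  by_cases h7 : c = '7'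
  · rw [if_pos (by simp [h7]), h7]
    rfl
  rw [if_neg (by simp [h7])]
  by_cases h8 : c = '8'
  · rw [if_pos (by simp [h8]), h8]
    rfl
  rw [if_neg (by simp [h8])]
  by_cases h9 : c = '9'
  · rw [if_pos (by simp [h9]), h9]
    rfl
  rw [if_neg (by simp [h9])]
  have e0 : (c == '0') = false := by simp [h0]
  have e1 : (c == '1') = false := by simp [h1]
  have e2 : (c == '2') = false := by simp [h2]
  have e3 : (c == '3') = false := by simp [h3]
  have e4 : (c == '4') = false := by simp [h4]
  have e5 : (c == '5') = false := by simp [h5]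
  have e6 : (c == '6') = false := by simp [h6]
  have e7 : (c == '7') = false := by simp [h7]
  have e8 : (c == '8') = false := by simp [h8]
  have e9 : (c == '9') = false := by simp [h9]
  have hnone : List.lookup c [('0','۰'),('1','۱'),('2','۲'),('3','۳'),('4','۴'),('5','۵'),('6','۶'),('7','۷'),('8','۸'),('9','۹')] = none := by
    simp [List.lookup, e0, e1, e2, e3, e4, e5, e6, e7, e8, e9]
  rw [hnone]
  simp only [Option.getD_none]
  rw [hgd, List.set_getElem_self]

theorem pv_persian_fold_aux (t : List Char) : ∀ m, m <= t.length →
    (List.range m).foldl (fun ln (j : Nat) => pvStepA ln (j : Int)) t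
      = (t.take m).map pvTr ++ t.drop m := by
  intro m
  induction m with
  | zero => simp
  | succ i ih =>
    intro hm
    have hi : i < t.length := by omega
    have hpl : ((t.take i).map pvTr).length = i := by simp; omega
    have hul : ((t.take i).map pvTr ++ t.drop i).length = t.length := by
      rw [List.length_append, hpl, List.length_drop]; omega
    rw [List.range_succ, List.foldl_append, ih (by omega)]
    simp only [List.foldl_cons, List.foldl_nil]
    rw [pv_stepA_eq _ i (by rw [hul]; omega)]
    have hget : ((t.take i).map pvTr ++ t.drop i).getD i ' ' = t[i] := by
      rw [List.getD, List.getElem?_append_right (le_of_eq hpl), hpl, Nat.sub_self]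
      simp [List.getElem?_drop, List.getElem?_eq_getElem hi]
    rw [hget, List.set_eq_take_append_cons_drop, if_pos (by rw [hul]; omega)]
    rw [List.take_left' hpl]
    have hd : ((t.take i).map pvTr ++ t.drop i).drop (i + 1) = t.drop (i + 1) := by
      rw [List.drop_append, List.drop_of_length_le (by omega), hpl, List.nil_append,
          List.drop_drop]
      congr 1
      omega
    rw [hd, List.take_add_one, List.map_append]
    simp [List.getElem?_eq_getElem hi]

-- the B-side chunk list in take/drop form
theorem pv_chunks_eq (s : List Char) :
    (PySem.List.pyRange 0 ((s.length : Int)) 3).map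
        (fun i => PySem.List.slice s (some i) (some (i + 3)))
      = (List.range ((s.length + 2) / 3)).map (fun k => (s.drop (3 * k)).take 3) := by
  rw [PySem.List.pyRange_of_pos _ _ (by norm_num), List.map_map]
  have hm : (if (0 : Int) < (s.length : Int)
      then (((s.length : Int) - 0 + 3 - 1) / 3).toNat else 0) = (s.length + 2) / 3 := by
    by_cases h : 0 < s.length
    · rw [if_pos (by exact_mod_cast h)]
      have : ((s.length : Int) - 0 + 3 - 1) = ((s.length + 2 : Nat) : Int) := by push_cast; ring
      rw [this]
      have : ((s.length + 2 : Nat) : Int) / 3 = (((s.length + 2) / 3 : Nat) : Int) := by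
        rw [Int.natCast_div]; norm_num
      rw [this, Int.toNat_natCast]
    · rw [if_neg (by exact_mod_cast h)]
      omega
  rw [hm]
  apply List.map_congr_left
  intro k _
  simp only [Function.comp_apply]
  have h1 : (0 : Int) + 3 * (k : Int) = ((3 * k : Nat) : Int) := by push_cast; ring
  rw [h1]
  rw [show (((3 * k : Nat) : Int) + 3) = (((3 * k : Nat) : Int) + ((3 : Nat) : Int)) from by
    norm_num]
  rw [PySem.List.slice_natCast_add]

-- ===== VERDICT (by name: the statement is the Claim_ definition above) =====
theorem NumConverter_spec : Claim_equal_NumConverter := by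
  unfold Claim_equal_NumConverter Spec_NumConverter
  intro number _
  unfold NumConverter NumConverter_alt
  simp only [PySem.List.slice?_none_none_neg_one, Option.getD_some]
  -- abbreviate the reversed digit list
  generalize (PySem.Int.toStr number).toList.reverse = l
  simp only [pv_foldl_snoc, List.nil_append]
  -- spacing
  rw [PySem.List.len_eq, pv_spacing]
  -- comma-insertion loop: indices
  rw [PySem.List.len_eq (List.map (fun j => ((3 * j + 3 : Nat) : Int))
        (List.range ((l.length - 1) / 3))),
      List.length_map, List.length_range,
      PySem.List.pyRange_zero_nat, List.foldl_map]
  have hbody : List.foldl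
      (fun (ln : List Char) (j : Nat) =>
        PySem.List.insert ln
          (PySem.List.pyGetD ((List.range ((l.length - 1) / 3)).map
              (fun j => ((3 * j + 3 : Nat) : Int))) (j : Int) 0 + (j : Int)) ',') l
      (List.range ((l.length - 1) / 3))
      = List.foldl (fun ln j => PySem.List.insert ln ((4 * j + 3 : Nat) : Int) ',') l
          (List.range ((l.length - 1) / 3)) := by
    apply PySem.List.foldl_congr_mem
    intro acc j hj
    rw [List.mem_range] at hj
    have hget : PySem.List.pyGetD ((List.range ((l.length - 1) / 3)).map
        (fun j => ((3 * j + 3 : Nat) : Int))) (j : Int) 0 = ((3 * j + 3 : Nat) : Int) := by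
      rw [PySem.List.pyGetD_natCast, List.getD, List.getElem?_map,
          List.getElem?_range hj]
      simp
    rw [hget]
    congr 1
    push_cast
    ring
  rw [hbody, pv_comma_eq_ref l.length l rfl]
  -- persian replacement loop
  rw [PySem.List.len_eq, PySem.List.pyRange_zero_nat, List.foldl_map]
  have hstep : (List.foldl (fun (ln : List Char) (j : Nat) => pvStepA ln (j : Int))
      (pvRef l).reverse (List.range (pvRef l).reverse.length))
      = ((pvRef l).reverse.take (pvRef l).reverse.length).map pvTr
          ++ (pvRef l).reverse.drop (pvRef l).reverse.length :=
    pv_persian_fold_aux _ _ (le_refl _)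
  rw [show (List.foldl (fun (ln : List Char) (j : Nat) =>
      if PySem.List.pyGetD ln (j : Int) ' ' == '0' then PySem.List.pySetD ln (j : Int) '۰'
      else if PySem.List.pyGetD ln (j : Int) ' ' == '1' then PySem.List.pySetD ln (j : Int) '۱'
      else if PySem.List.pyGetD ln (j : Int) ' ' == '2' then PySem.List.pySetD ln (j : Int) '۲'
      else if PySem.List.pyGetD ln (j : Int) ' ' == '3' then PySem.List.pySetD ln (j : Int) '۳'
      else if PySem.List.pyGetD ln (j : Int) ' ' == '4' then PySem.List.pySetD ln (j : Int) '۴'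
      else if PySem.List.pyGetD ln (j : Int) ' ' == '5' then PySem.List.pySetD ln (j : Int) '۵'
      else if PySem.List.pyGetD ln (j : Int) ' ' == '6' then PySem.List.pySetD ln (j : Int) '۶'
      else if PySem.List.pyGetD ln (j : Int) ' ' == '7' then PySem.List.pySetD ln (j : Int) '۷'
      else if PySem.List.pyGetD ln (j : Int) ' ' == '8' then PySem.List.pySetD ln (j : Int) '۸'
      else if PySem.List.pyGetD ln (j : Int) ' ' == '9' then PySem.List.pySetD ln (j : Int) '۹'
      else ln)
      (pvRef l).reverse (List.range (pvRef l).reverse.length))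
      = (List.foldl (fun (ln : List Char) (j : Nat) => pvStepA ln (j : Int))
          (pvRef l).reverse (List.range (pvRef l).reverse.length)) from rfl,
    hstep, List.take_length, List.drop_length, List.append_nil]
  -- B side
  rw [pv_chunks_eq]
  have hjoin : PySem.Chars.join [','] ((List.range ((l.length + 2) / 3)).map
      (fun k => (l.drop (3 * k)).take 3)) = pvRef l := by
    rw [PySem.Chars.join]
    exact pv_inter_chunks l.length l rfl
  rw [hjoin]
  rfl
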